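-- pv_equiv track=rewrite | github.com/JunsangJasonPark/codecademy_datascientist | hurricane_anal.py | rate_mortality
-- ===== SOURCE A (Python) =====
-- def rate_mortality(table):
--   for item in table:
--     if table[item]['Deaths'] > 10000:
--       table[item]['Mortality'] = 5
--     elif table[item]['Deaths'] > 1000:
--       table[item]['Mortality'] = 4
--     elif table[item]['Deaths'] > 500:
--       table[item]['Mortality'] = 3
--     elif table[item]['Deaths'] > 100:
--       table[item]['Mortality'] = 2
--     elif table[item]['Deaths'] > 0:
--       table[item]['Mortality'] = 1
--     else:
--       table[item]['Mortality'] = 0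
--   return table
-- ===== SOURCE B (Python) =====
-- def rate_mortality(table):
--   thresholds = [0, 100, 500, 1000, 10000]
--   for item in table:
--     deaths = table[item]['Deaths']
--     rating = 0
--     for t in thresholds:
--       if t < deaths:
--         rating += 1
--     table[item]['Mortality'] = rating
--   return table
-- ===== Notes on version B (the rewrite author's own statement) =====
-- stated objective: idiomatic
-- what changed: Replaces the five-branch if/elif cascade with an ordered threshold table [0,100,500,1000,10000] whose rating is the count of thresholds strictly below the deaths value, computed by one small counting loop.
import Mathlib
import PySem

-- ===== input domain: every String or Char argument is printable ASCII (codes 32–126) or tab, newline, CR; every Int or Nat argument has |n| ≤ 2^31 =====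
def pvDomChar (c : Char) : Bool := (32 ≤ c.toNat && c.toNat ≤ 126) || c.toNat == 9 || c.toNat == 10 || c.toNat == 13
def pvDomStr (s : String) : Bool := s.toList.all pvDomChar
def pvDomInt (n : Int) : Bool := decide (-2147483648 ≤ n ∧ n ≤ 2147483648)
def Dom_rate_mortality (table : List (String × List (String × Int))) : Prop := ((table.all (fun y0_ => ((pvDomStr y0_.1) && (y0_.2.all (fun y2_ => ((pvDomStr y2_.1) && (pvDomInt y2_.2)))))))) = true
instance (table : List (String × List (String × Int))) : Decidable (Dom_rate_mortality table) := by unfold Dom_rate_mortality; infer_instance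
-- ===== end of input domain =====

-- B assigns the mortality rating as the count of thresholds in [0,100,500,1000,10000]
-- strictly below the death toll, instead of A's if/elif cascade; same return value.
-- (The Python mutates its argument in place; the equivalence proved is about the return value.)

-- Python-dict primitives shared by both ports (exact Python semantics on an assoc list):
-- d[k] with default 0 (first match; only used under Pre_, which guarantees the key is present)
def pvGetKey (d : List (String × Int)) (k : String) : Int :=
  match d with
  | [] => 0
  | (k', v) :: rest => if k' == k then v else pvGetKey rest k

-- d[k] = v : overwrite the first occurrence in place, else append (Python dict assignment)
def pvSetKey (d : List (String × Int)) (k : String) (v : Int) : List (String × Int) :=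
  match d with
  | [] => [(k, v)]
  | (k', v') :: rest => if k' == k then (k', v) :: rest else (k', v') :: pvSetKey rest k v

-- ===== PORT A =====
def rate_mortality (table : List (String × List (String × Int))) : List (String × List (String × Int)) :=
  table.map (fun item =>
    let deaths := pvGetKey item.2 "Deaths"
    (item.1, pvSetKey item.2 "Mortality"
      (if deaths > 10000 then 5
       else if deaths > 1000 then 4
       else if deaths > 500 then 3
       else if deaths > 100 then 2
       else if deaths > 0 then 1
       else 0)))

-- ===== PORT B =====
def rate_mortality_alt (table : List (String × List (String × Int))) : List (String × List (String × Int)) :=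
  table.map (fun item =>
    let deaths := pvGetKey item.2 "Deaths"
    (item.1, pvSetKey item.2 "Mortality"
      (([0, 100, 500, 1000, 10000] : List Int).foldl
        (fun rating t => if t < deaths then rating + 1 else rating) 0)))

-- ===== PRECONDITION & SPEC =====
-- A raises KeyError when an inner dict lacks the key 'Deaths'; Pre_ requires it to be present.
def Pre_rate_mortality (table : List (String × List (String × Int))) : Prop :=
  (table.all (fun item => item.2.any (fun p => p.1 == "Deaths"))) = true
instance (table : List (String × List (String × Int))) : Decidable (Pre_rate_mortality table) := by unfold Pre_rate_mortality; infer_instance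
def pvWitness_rate_mortality : (List (String × List (String × Int))) :=
  [("Katrina", [("Deaths", 1836)]), ("Camille", [("Deaths", 259), ("Mortality", 9)])]
def Spec_rate_mortality (table : List (String × List (String × Int))) (out : List (String × List (String × Int))) : Prop := out = rate_mortality_alt table
instance (table : List (String × List (String × Int))) (out : List (String × List (String × Int))) : Decidable (Spec_rate_mortality table out) := by unfold Spec_rate_mortality; infer_instance

-- ===== CLAIM (what is proved, stated in full; the proofs are below) =====
def Claim_equal_rate_mortality : Prop := ∀ (table : List (String × List (String × Int))), Dom_rate_mortality table → Pre_rate_mortality table → Spec_rate_mortality table (rate_mortality table)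

-- ===== LEMMAS AND PROOFS =====
-- the if/elif cascade computes the count of thresholds strictly below d
lemma rating_eq (d : Int) :
    (if d > 10000 then (5:Int) else if d > 1000 then 4 else if d > 500 then 3
     else if d > 100 then 2 else if d > 0 then 1 else 0)
    = ([0, 100, 500, 1000, 10000] : List Int).foldl
        (fun rating t => if t < d then rating + 1 else rating) 0 := by
  simp only [List.foldl]
  split_ifs <;> omega

-- ===== VERDICT (by name: the statement is the Claim_ definition above) =====
theorem rate_mortality_spec : Claim_equal_rate_mortality := by
  intro table _ _
  unfold Spec_rate_mortality rate_mortality rate_mortality_alt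
  exact List.map_congr_left (fun item _ => by simp only [rating_eq])
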